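-- pv_equiv track=rewrite | github.com/arcyleung/Snippets | python/arrayEndSearch.py | arrayEndSearchRecursive
-- ===== SOURCE A (Python) =====
-- def arrayEndSearchRecursive(set, current):
--     if (current >= len(set)):
--         return True
--     else:
--         found = False
--         for i in range(1, set[current]+1):
--             found = found | arrayEndSearchRecursive(set, current+i)
--         return found
-- ===== SOURCE B (Python) =====
-- def arrayEndSearchRecursive(set, current):
--     # Backward greedy jump-game pass: m is the nearest position >= c+1 from
--     # which the end is known to be reachable (n itself counts as "the end").
--     n = len(set)
--     if current >= n:
--         return True
--     m = n
--     c = n - 1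
--     while c >= current:
--         if set[c] >= m - c:
--             m = c
--         c -= 1
--     return m == current
-- ===== Notes on version B (the rewrite author's own statement) =====
-- stated objective: alternative
-- what changed: Replaced the exhaustive recursive search over all jump sequences by a single backward greedy pass that tracks the nearest position from which the end is known reachable.
import Mathlib
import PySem

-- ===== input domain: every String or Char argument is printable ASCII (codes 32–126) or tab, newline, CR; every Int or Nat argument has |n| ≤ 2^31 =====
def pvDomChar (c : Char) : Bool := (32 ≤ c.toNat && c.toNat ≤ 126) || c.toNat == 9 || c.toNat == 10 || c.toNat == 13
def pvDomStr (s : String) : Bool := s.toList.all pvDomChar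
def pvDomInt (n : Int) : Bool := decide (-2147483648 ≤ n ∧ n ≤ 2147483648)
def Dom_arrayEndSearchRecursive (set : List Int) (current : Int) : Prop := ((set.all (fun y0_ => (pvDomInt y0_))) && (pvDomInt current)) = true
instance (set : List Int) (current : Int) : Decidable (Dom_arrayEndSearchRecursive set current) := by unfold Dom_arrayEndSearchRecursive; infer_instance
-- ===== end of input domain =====

-- B replaces A's exhaustive recursive search by a single backward greedy jump-game pass (alternative algorithm).


-- ===== PORT A =====
-- literal port of A: 'found = found | arrayEndSearchRecursive(set, current+i)' folded
-- over range(1, set[current]+1); set[current] via pyGet? (Pre_ guarantees it is in range)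
def arrayEndSearchRecursive (set : List Int) (current : Int) : Bool :=
  if _h : current ≥ (set.length : Int) then true
  else
    (PySem.List.pyRange 1 (((PySem.List.pyGet? set current).getD 0) + 1) 1).attach.foldl
      (fun found i => found || arrayEndSearchRecursive set (current + i.1)) false
termination_by ((set.length : Int) - current).toNat
decreasing_by
  have hi : (1 : Int) ≤ i.1 ∧ i.1 < ((PySem.List.pyGet? set current).getD 0) + 1 :=
    (PySem.List.mem_pyRange_one).1 i.2
  omega

-- ===== PORT B =====
-- while c >= current: if set[c] >= m - c: m = c; c -= 1
def altLoop (set : List Int) (current c m : Int) : Int :=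
  if _h : c ≥ current then
    altLoop set current (c - 1)
      (if ((PySem.List.pyGet? set c).getD 0) ≥ m - c then c else m)
  else m
termination_by (c - current + 1).toNat
decreasing_by omega

def arrayEndSearchRecursive_alt (set : List Int) (current : Int) : Bool :=
  if current ≥ (set.length : Int) then true
  else altLoop set current ((set.length : Int) - 1) (set.length : Int) == current

-- ===== PRECONDITION & SPEC =====
-- Pre_ excludes exactly the inputs where Python A raises IndexError: current < -len(set)
-- (every index the recursion touches is then valid, by Python's negative-index rule).
def Pre_arrayEndSearchRecursive (set : List Int) (current : Int) : Prop :=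
  -(set.length : Int) ≤ current
instance (set : List Int) (current : Int) : Decidable (Pre_arrayEndSearchRecursive set current) := by unfold Pre_arrayEndSearchRecursive; infer_instance
def pvWitness_arrayEndSearchRecursive : List Int × Int := ([2, 0, 1], 0)

def Spec_arrayEndSearchRecursive (set : List Int) (current : Int) (out : Bool) : Prop := out = arrayEndSearchRecursive_alt set current
instance (set : List Int) (current : Int) (out : Bool) : Decidable (Spec_arrayEndSearchRecursive set current out) := by unfold Spec_arrayEndSearchRecursive; infer_instance

-- ===== CLAIM (what is proved, stated in full; the proofs are below) =====
def Claim_equal_arrayEndSearchRecursive : Prop := ∀ (set : List Int) (current : Int), Dom_arrayEndSearchRecursive set current → Pre_arrayEndSearchRecursive set current → Spec_arrayEndSearchRecursive set current (arrayEndSearchRecursive set current)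

-- ===== LEMMAS AND PROOFS =====

-- fold of '||' over a list is 'any'
theorem foldl_or_eq_any {α : Type} (p : α → Bool) (L : List α) (b : Bool) :
    L.foldl (fun acc x => acc || p x) b = (b || L.any p) := by
  induction L generalizing b with
  | nil => simp
  | cons x xs ih => simp [List.foldl, ih, Bool.or_assoc]

-- A's recursion characterised: true iff some jump 1..v leads to a true position
theorem A_unfold (set : List Int) (current : Int) (h : current < (set.length : Int)) :
    arrayEndSearchRecursive set current =
      ((PySem.List.pyRange 1 (((PySem.List.pyGet? set current).getD 0) + 1) 1).any
        (fun i => arrayEndSearchRecursive set (current + i))) := by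
  rw [arrayEndSearchRecursive.eq_def]
  rw [dif_neg (by omega)]
  rw [List.foldl_attach (l := PySem.List.pyRange 1 (((PySem.List.pyGet? set current).getD 0) + 1) 1)
      (f := fun found i => found || arrayEndSearchRecursive set (current + i)) (b := false)]
  rw [foldl_or_eq_any]
  simp

theorem A_true_iff (set : List Int) (current : Int) (h : current < (set.length : Int)) :
    arrayEndSearchRecursive set current = true ↔
      ∃ i : Int, 1 ≤ i ∧ i ≤ (PySem.List.pyGet? set current).getD 0 ∧
        arrayEndSearchRecursive set (current + i) = true := by
  rw [A_unfold set current h, List.any_eq_true]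
  constructor
  · rintro ⟨i, hmem, hA⟩
    have := (PySem.List.mem_pyRange_one).1 hmem
    exact ⟨i, this.1, by omega, hA⟩
  · rintro ⟨i, h1, h2, hA⟩
    exact ⟨i, (PySem.List.mem_pyRange_one).2 ⟨h1, by omega⟩, hA⟩

theorem A_ge (set : List Int) (current : Int) (h : (set.length : Int) ≤ current) :
    arrayEndSearchRecursive set current = true := by
  rw [arrayEndSearchRecursive, dif_pos (by omega)]

-- invariant: m is the least position > c (up to n) from which A succeeds
def ALInv (set : List Int) (c m : Int) : Prop :=
  c < m ∧ m ≤ (set.length : Int) ∧ arrayEndSearchRecursive set m = true ∧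
    ∀ c', c < c' → c' < m → arrayEndSearchRecursive set c' ≠ true

-- with the invariant, A at c is decided by one comparison
theorem A_step (set : List Int) (c m : Int) (hc : c < (set.length : Int))
    (hinv : ALInv set c m) :
    (arrayEndSearchRecursive set c = true ↔ ((PySem.List.pyGet? set c).getD 0) ≥ m - c) := by
  obtain ⟨hcm, hmn, hPm, hmin⟩ := hinv
  constructor
  · intro hA
    obtain ⟨i, h1, h2, hAi⟩ := (A_true_iff set c hc).1 hA
    by_contra hlt
    have hci : c + i < m := by omega
    exact hmin (c + i) (by omega) hci hAi
  · intro hge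
    refine (A_true_iff set c hc).2 ⟨m - c, by omega, hge, ?_⟩
    simpa [show c + (m - c) = m by ring] using hPm

theorem altLoop_inv (set : List Int) (current : Int) :
    ∀ c m, current - 1 ≤ c → c < (set.length : Int) → ALInv set c m →
      ALInv set (current - 1) (altLoop set current c m) := by
  intro c m hge hlt hinv
  induction hn : (c - current + 1).toNat generalizing c m with
  | zero =>
    rw [altLoop.eq_def, dif_neg (by omega)]
    have : c = current - 1 := by omega
    rwa [this] at hinv
  | succ k ih =>
    rw [altLoop.eq_def, dif_pos (by omega)]
    by_cases hgood : ((PySem.List.pyGet? set c).getD 0) ≥ m - c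
    · rw [if_pos hgood]
      by_cases hc : current - 1 ≤ c - 1
      · refine ih (c - 1) c (by omega) (by omega) ?_ (by omega)
        refine ⟨by omega, by omega, (A_step set c m hlt hinv).2 hgood, ?_⟩
        intro c' h1 h2; omega
      · rw [altLoop.eq_def, dif_neg (by omega)]
        have hce : c = current - 1 := by omega
        exact hce ▸ ⟨by omega, by omega, (A_step set c m hlt hinv).2 hgood,
          fun c' h1 h2 => by omega⟩
    · rw [if_neg hgood]
      by_cases hc : current - 1 ≤ c - 1
      · refine ih (c - 1) m (by omega) (by omega) ?_ (by omega)
        obtain ⟨hcm, hmn, hPm, hmin⟩ := hinv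
        refine ⟨by omega, hmn, hPm, ?_⟩
        intro c' h1 h2
        by_cases hcc : c' = c
        · subst hcc
          intro hA
          exact hgood ((A_step set c' m hlt ⟨hcm, hmn, hPm, hmin⟩).1 hA)
        · exact hmin c' (by omega) h2
      · rw [altLoop.eq_def, dif_neg (by omega)]
        have hce : c = current - 1 := by omega
        obtain ⟨hcm, hmn, hPm, hmin⟩ := hinv
        exact hce ▸ ⟨by omega, hmn, hPm, fun c' h1 h2 => hmin c' (by omega) h2⟩

-- ===== VERDICT (by name: the statement is the Claim_ definition above) =====
theorem arrayEndSearchRecursive_spec : Claim_equal_arrayEndSearchRecursive := by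
  intro set current _hdom _hpre
  unfold Spec_arrayEndSearchRecursive arrayEndSearchRecursive_alt
  by_cases hge : current ≥ (set.length : Int)
  · rw [if_pos hge]
    exact A_ge set current hge
  · rw [if_neg hge]
    have hinv0 : ALInv set ((set.length : Int) - 1) (set.length : Int) :=
      ⟨by omega, le_refl _, A_ge set _ (le_refl _), fun c' h1 h2 => by omega⟩
    have hfin := altLoop_inv set current ((set.length : Int) - 1) (set.length : Int)
      (by omega) (by omega) hinv0
    obtain ⟨h1, h2, h3, h4⟩ := hfin
    set m := altLoop set current ((set.length : Int) - 1) (set.length : Int) with hm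
    by_cases hA : arrayEndSearchRecursive set current = true
    · have : ¬ current < m := fun hlt' => h4 current (by omega) hlt' hA
      have hme : m = current := by omega
      simp [hA, hme]
    · have hmne : m ≠ current := fun hme => hA (hme ▸ h3)
      simp [Bool.not_eq_true] at hA
      simp [hA, hmne]
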